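-- pv_equiv track=rewrite | github.com/bingual/Programmers | 프로그래머스/2/148653. 마법의 엘리베이터/마법의 엘리베이터.py | solution
-- ===== SOURCE A (Python) =====
-- from collections import deque
--
-- def solution(storey):
--     answer = 0
--
--     que = deque([int(n) for n in str(storey)])
--     while que:
--         p = que.pop()
--         if que and p == 5 and que[-1] < 5 or not que and p == 5:
--             answer += p
--         elif p >= 5:
--             cal = 10 - p
--             answer += cal
--
--             while que and que[-1] + 1 == 10:
--                 que.pop()
--
--             if que:
--                 que[-1] += 1
--             elif not que:
--                 que.append(1)
--         else:
--             answer += p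
--     return answer
-- ===== SOURCE B (Python) =====
-- def solution(storey):
--     answer = 0
--     while storey:
--         r = storey % 10
--         storey //= 10
--         if r > 5 or (r == 5 and storey % 10 >= 5):
--             answer += 10 - r
--             storey += 1
--         else:
--             answer += r
--     return answer
-- ===== Notes on version B (the rewrite author's own statement) =====
-- stated objective: simpler
-- what changed: B replaces A's str()/deque digit list and explicit inner carry-propagation while-loop by a pure arithmetic loop (storey % 10, storey //= 10, storey += 1 on carry) that needs no string conversion or data structure.
import Mathlib
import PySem

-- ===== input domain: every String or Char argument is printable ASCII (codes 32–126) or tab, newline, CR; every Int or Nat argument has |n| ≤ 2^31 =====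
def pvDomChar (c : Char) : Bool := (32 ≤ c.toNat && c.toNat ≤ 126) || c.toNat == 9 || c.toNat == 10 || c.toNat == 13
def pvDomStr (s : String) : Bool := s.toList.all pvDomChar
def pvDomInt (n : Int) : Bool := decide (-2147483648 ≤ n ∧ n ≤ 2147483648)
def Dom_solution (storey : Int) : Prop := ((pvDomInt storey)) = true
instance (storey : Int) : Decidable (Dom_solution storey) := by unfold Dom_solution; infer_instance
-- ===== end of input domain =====

-- B replaces A's string conversion, deque and explicit carry-propagation loop by a pure
-- arithmetic loop on the number itself (objective: simpler); return value only, no mutation.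

-- ===== PORT A =====
-- while que and que[-1] + 1 == 10: que.pop()
def solDropNines (que : List Int) : List Int :=
  if h : que ≠ [] ∧ PySem.List.pyGetD que (-1) 0 + 1 = 10 then
    solDropNines que.dropLast
  else que
termination_by que.length
decreasing_by
  have : 0 < que.length := List.length_pos_iff.mpr h.1
  simp [List.length_dropLast]; omega

-- que[-1] += 1 (the deque's last element is incremented in place)
def solIncLast : List Int → List Int
  | [] => []
  | [d] => [d + 1]
  | d :: e :: rest => d :: solIncLast (e :: rest)

-- termination measure of A's while loop (the only non-shrinking step leaves the deque [1])
def solMu (que : List Int) : Nat :=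
  2 * que.length - (if que = [1] then 1 else 0)

theorem solMu_rest_lt (que : List Int) (hne : que ≠ []) : solMu que.dropLast < solMu que := by
  have : 0 < que.length := List.length_pos_iff.mpr hne
  simp only [solMu, List.length_dropLast]
  split_ifs <;> omega

theorem solMu_carry_lt (que que' : List Int) (hne : que ≠ [1]) (hq : que ≠ [])
    (h : que' = [1] ∨ que'.length + 1 ≤ que.length) : solMu que' < solMu que := by
  have hlen : 0 < que.length := List.length_pos_iff.mpr hq
  rcases h with h | h
  · simp only [solMu, h, if_neg hne]
    simp; omega
  · simp only [solMu]
    split_ifs <;> omega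

theorem solDropNines_len (que : List Int) : (solDropNines que).length ≤ que.length := by
  induction que using solDropNines.induct with
  | case1 que h ih =>
    rw [solDropNines, dif_pos h]
    calc (solDropNines que.dropLast).length ≤ que.dropLast.length := ih
    _ ≤ que.length := by simp [List.length_dropLast]
  | case2 que h => rw [solDropNines, dif_neg h]

theorem solIncLast_len (xs : List Int) : (solIncLast xs).length = xs.length := by
  induction xs with
  | nil => rfl
  | cons d rest ih =>
    cases rest with
    | nil => rfl
    | cons e rest' => simp [solIncLast] at ih ⊢; omega

-- the while loop of A, state = (answer, que)
def solLoop (answer : Int) (que : List Int) : Int :=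
  if hq : que = [] then answer
  else
    let p := PySem.List.pyGetD que (-1) 0
    let rest := que.dropLast
    if (rest ≠ [] ∧ p = 5 ∧ PySem.List.pyGetD rest (-1) 0 < 5) ∨ (rest = [] ∧ p = 5) then
      solLoop (answer + p) rest
    else if 5 ≤ p then
      let rest' := solDropNines rest
      solLoop (answer + (10 - p)) (if rest' ≠ [] then solIncLast rest' else [1])
    else
      solLoop (answer + p) rest
termination_by solMu que
decreasing_by
  · exact solMu_rest_lt que hq
  · apply solMu_carry_lt _ _ ?hne1 hq
    case hne1 =>
      intro hq1
      subst hq1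
      have h1 : ¬ (5:Int) ≤ PySem.List.pyGetD ([(1:Int)]) (-1) 0 := by decide
      exact h1 (by assumption)
    · split_ifs with h1
      · right
        have h2 := solDropNines_len que.dropLast
        have : 0 < que.length := List.length_pos_iff.mpr hq
        rw [solIncLast_len]
        simp only [List.length_dropLast] at h2 ⊢
        omega
      · left; rfl
  · exact solMu_rest_lt que hq

-- que = deque([int(n) for n in str(storey)]); int('-') raises ValueError, so the .getD 0
-- default is unreachable inside Pre_solution (0 ≤ storey)
def solution (storey : Int) : Int :=
  let que := (PySem.Int.toStr storey).toList.map
    (fun c => (PySem.Int.ofStr? (String.ofList [c])).getD 0)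
  solLoop 0 que

-- ===== PORT B =====
-- while storey: r = storey % 10; storey //= 10; carry or keep (Source B)
def solAltLoop (storey answer : Int) : Int :=
  if hs : storey = 0 then answer
  else
    let r := PySem.Int.mod storey 10
    let s := PySem.Int.floordiv storey 10
    if 5 < r ∨ (r = 5 ∧ 5 ≤ PySem.Int.mod s 10) then
      solAltLoop (s + 1) (answer + (10 - r))
    else
      solAltLoop s (answer + r)
termination_by storey.natAbs
decreasing_by
  all_goals
    have heq := PySem.Int.floordiv_mul_add_mod storey 10
    have h1 := PySem.Int.mod_nonneg storey (b := 10) (by norm_num)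
    have h2 := PySem.Int.mod_lt storey (b := 10) (by norm_num)
    simp only at *
    omega

def solution_alt (storey : Int) : Int := solAltLoop storey 0

-- ===== PRECONDITION & SPEC =====
-- A raises ValueError on negative storey (int('-')); excluded
def Pre_solution (storey : Int) : Prop := 0 ≤ storey
instance (storey : Int) : Decidable (Pre_solution storey) := by unfold Pre_solution; infer_instance
def pvWitness_solution : Int := 2554

def Spec_solution (storey : Int) (out : Int) : Prop := out = solution_alt storey
instance (storey : Int) (out : Int) : Decidable (Spec_solution storey out) := by unfold Spec_solution; infer_instance

-- ===== CLAIM (what is proved, stated in full; the proofs are below) =====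
def Claim_equal_solution : Prop := ∀ (storey : Int), Dom_solution storey → Pre_solution storey → Spec_solution storey (solution storey)

-- ===== LEMMAS AND PROOFS =====

-- value of a digit list, most significant first
def solVal (xs : List Int) : Int := xs.foldl (fun a d => 10 * a + d) 0

def solOK (xs : List Int) : Prop := ∀ d ∈ xs, 0 ≤ d ∧ d ≤ 9

theorem solVal_append (xs : List Int) (d : Int) : solVal (xs ++ [d]) = 10 * solVal xs + d := by
  simp [solVal, List.foldl_append]

theorem solVal_nonneg (xs : List Int) (h : solOK xs) : 0 ≤ solVal xs := by
  induction xs using List.reverseRecOn with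
  | nil => simp [solVal]
  | append_singleton ys d ih =>
    rw [solVal_append]
    have hd := h d (by simp)
    have := ih (fun e he => h e (by simp [he]))
    omega

theorem solVal_mod (xs : List Int) (h : solOK xs) (hne : xs ≠ []) :
    PySem.Int.mod (solVal xs) 10 = xs.getLast hne := by
  obtain ⟨ys, d, rfl⟩ : ∃ ys d, ys ++ [d] = xs := ⟨xs.dropLast, xs.getLast hne, List.dropLast_append_getLast hne⟩
  rw [solVal_append, PySem.Int.mod_eq_emod_of_pos (by norm_num)]
  have hd := h d (by simp)
  have hys := solVal_nonneg ys (fun e he => h e (by simp [he]))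
  simp only [List.getLast_append, List.isEmpty_cons, Bool.false_eq_true, dite_false,
    List.getLast_singleton]
  omega

-- padding with trailing zeros does not change B's loop
theorem solAltLoop_pad (k : Nat) (v ans : Int) (hv : 0 ≤ v) :
    solAltLoop (v * 10 ^ k) ans = solAltLoop v ans := by
  induction k with
  | zero => simp
  | succ k ih =>
    by_cases h0 : v = 0
    · rw [h0]; simp
    · have hne : v * 10 ^ (k + 1) ≠ 0 := by positivity
      rw [solAltLoop, dif_neg hne]
      have hmul : v * 10 ^ (k + 1) = (v * 10 ^ k) * 10 := by ring
      have hr : PySem.Int.mod (v * 10 ^ (k + 1)) 10 = 0 := by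
        rw [hmul, PySem.Int.mod_eq_emod_of_pos (by norm_num), Int.mul_emod_left]
      have hs : PySem.Int.floordiv (v * 10 ^ (k + 1)) 10 = v * 10 ^ k := by
        rw [hmul, PySem.Int.floordiv_eq_ediv_of_pos (by norm_num), Int.mul_ediv_cancel _ (by norm_num)]
      rw [hr, hs]
      rw [if_neg (by norm_num)]
      rw [add_zero]
      exact ih

theorem solIncLast_eq (xs : List Int) (d : Int) : solIncLast (xs ++ [d]) = xs ++ [d + 1] := by
  induction xs with
  | nil => rfl
  | cons x xs ih =>
    cases xs with
    | nil => rfl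
    | cons y ys =>
      simp only [List.cons_append, solIncLast] at ih ⊢
      rw [ih]

-- A's carry step (pop the 9-run, bump or append 1) produces val rest + 1 up to trailing zeros
theorem solCarry (rest : List Int) (h : solOK rest) :
    ∃ k : Nat, solOK (if solDropNines rest ≠ [] then solIncLast (solDropNines rest) else [1]) ∧
      solVal (if solDropNines rest ≠ [] then solIncLast (solDropNines rest) else [1]) * 10 ^ k
        = solVal rest + 1 ∧
      ((if solDropNines rest ≠ [] then solIncLast (solDropNines rest) else [1]) = [1] ∨
        (if solDropNines rest ≠ [] then solIncLast (solDropNines rest) else [1]).length ≤ rest.length) := by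
  induction rest using solDropNines.induct with
  | case1 rest hcond ih =>
    obtain ⟨hne, hlast⟩ := hcond
    have h9 : rest.getLast hne = 9 := by
      rw [PySem.List.pyGetD_neg_one rest 0 hne] at hlast; omega
    have hrest : rest.dropLast ++ [9] = rest := by
      rw [← h9]; exact List.dropLast_append_getLast hne
    have hdn : solDropNines rest = solDropNines rest.dropLast := by
      rw [solDropNines, dif_pos ⟨hne, hlast⟩]
    have hokd : solOK rest.dropLast := fun e he => h e (by rw [← hrest]; exact List.mem_append_left _ he)
    obtain ⟨k, hok', hval', hlen'⟩ := ih hokd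
    rw [hdn]
    refine ⟨k + 1, hok', ?_, ?_⟩
    · have hv : solVal rest = 10 * solVal rest.dropLast + 9 := by
        rw [← hrest, solVal_append, hrest]
      rw [pow_succ, ← mul_assoc, hval']
      omega
    · rcases hlen' with h1 | h1
      · exact Or.inl h1
      · refine Or.inr ?_
        have h2 : rest.dropLast.length + 1 = rest.length := by
          have : 0 < rest.length := List.length_pos_iff.mpr hne
          simp [List.length_dropLast]; omega
        omega
  | case2 rest hcond =>
    by_cases hne : rest = []
    · subst hne
      have hdn : solDropNines ([] : List Int) = [] := by
        rw [solDropNines, dif_neg (by simp)]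
      refine ⟨0, ?_, ?_, ?_⟩
      · rw [if_neg (by simp [hdn])]
        intro d hd; simp at hd; omega
      · rw [if_neg (by simp [hdn])]
        simp [solVal]
      · rw [if_neg (by simp [hdn])]
        exact Or.inl rfl
    · have hdn : solDropNines rest = rest := by rw [solDropNines, dif_neg hcond]
      have hd9mem := h _ (List.getLast_mem hne)
      have hd9 : rest.getLast hne ≤ 8 := by
        have hx : ¬ (PySem.List.pyGetD rest (-1) 0 + 1 = 10) := fun hx => hcond ⟨hne, hx⟩
        rw [PySem.List.pyGetD_neg_one rest 0 hne] at hx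
        omega
      have hrest : rest.dropLast ++ [rest.getLast hne] = rest := List.dropLast_append_getLast hne
      have hinc : solIncLast rest = rest.dropLast ++ [rest.getLast hne + 1] := by
        conv_lhs => rw [← hrest]
        rw [solIncLast_eq]
      refine ⟨0, ?_, ?_, ?_⟩
      · rw [if_pos (by rw [hdn]; exact hne), hdn, hinc]
        intro d hd
        rcases List.mem_append.mp hd with hd | hd
        · exact h d (by rw [← hrest]; exact List.mem_append_left _ hd)
        · simp at hd; omega
      · rw [if_pos (by rw [hdn]; exact hne), hdn, hinc, pow_zero, mul_one, solVal_append]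
        conv_rhs => rw [← hrest, solVal_append]
        ring
      · rw [if_pos (by rw [hdn]; exact hne), hdn, hinc]
        refine Or.inr ?_
        have h1 : 0 < rest.length := List.length_pos_iff.mpr hne
        simp [List.length_dropLast]
        omega

-- main loop correspondence
theorem solLoop_nil (ans : Int) : solLoop ans [] = ans := by
  rw [solLoop]; simp

theorem solAltLoop_zero (ans : Int) : solAltLoop 0 ans = ans := by
  rw [solAltLoop]; simp

theorem solLoop_eq (n : Nat) : ∀ que : List Int, solMu que ≤ n → solOK que →
    ∀ ans : Int, solLoop ans que = solAltLoop (solVal que) ans := by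
  induction n with
  | zero =>
    intro que hmu hok ans
    have hq : que = [] := by
      by_contra hne
      have h1 : 0 < que.length := List.length_pos_iff.mpr hne
      simp only [solMu] at hmu
      split_ifs at hmu with h2
      · rw [h2] at hmu; norm_num at hmu
      · omega
    subst hq
    rw [solLoop_nil]
    show ans = solAltLoop (solVal []) ans
    rw [show solVal [] = 0 from rfl, solAltLoop_zero]
  | succ n ih =>
    intro que hmu hok ans
    by_cases hq : que = []
    · subst hq
      rw [solLoop_nil, show solVal [] = 0 from rfl, solAltLoop_zero]
    · rw [solLoop, dif_neg hq]
      simp only [PySem.List.pyGetD_neg_one que 0 hq]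
      have hque : que.dropLast ++ [que.getLast hq] = que := List.dropLast_append_getLast hq
      have hval : solVal que = 10 * solVal que.dropLast + que.getLast hq := by
        conv_lhs => rw [← hque]
        rw [solVal_append]
      have hokr : solOK que.dropLast :=
        fun e he => hok e (by rw [← hque]; exact List.mem_append_left _ he)
      have hp09 := hok _ (List.getLast_mem hq)
      have hvr : 0 ≤ solVal que.dropLast := solVal_nonneg _ hokr
      have hmur : solMu que.dropLast ≤ n := by
        have := solMu_rest_lt que hq
        omega
      by_cases hz : solVal que = 0
      · have hz2 : solVal que.dropLast = 0 ∧ que.getLast hq = 0 := by omega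
        rw [hz, solAltLoop_zero]
        rw [if_neg (by rcases hz2 with ⟨-, h0⟩; rintro (⟨-, h5, -⟩ | ⟨-, h5⟩) <;> omega)]
        rw [if_neg (by omega)]
        rw [ih que.dropLast hmur hokr (ans + que.getLast hq), hz2.1, solAltLoop_zero]
        omega
      · conv_rhs => rw [solAltLoop, dif_neg hz]
        have hr : PySem.Int.mod (solVal que) 10 = que.getLast hq := by
          rw [PySem.Int.mod_eq_emod_of_pos (by norm_num), hval]
          omega
        have hs : PySem.Int.floordiv (solVal que) 10 = solVal que.dropLast := by
          rw [PySem.Int.floordiv_eq_ediv_of_pos (by norm_num), hval]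
          omega
        simp only [hr, hs]
        by_cases hb1 : (que.dropLast ≠ [] ∧ que.getLast hq = 5 ∧ PySem.List.pyGetD que.dropLast (-1) 0 < 5) ∨ (que.dropLast = [] ∧ que.getLast hq = 5)
        · rw [if_pos hb1]
          have hBfalse : ¬(5 < que.getLast hq ∨ (que.getLast hq = 5 ∧ 5 ≤ PySem.Int.mod (solVal que.dropLast) 10)) := by
            rcases hb1 with ⟨hrne, hp5, hlt⟩ | ⟨hrnil, hp5⟩
            · rw [solVal_mod que.dropLast hokr hrne]
              rw [PySem.List.pyGetD_neg_one que.dropLast 0 hrne] at hlt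
              omega
            · rw [hrnil, show solVal [] = 0 from rfl]
              rw [show PySem.Int.mod 0 10 = 0 from rfl]
              omega
          rw [if_neg hBfalse]
          exact ih que.dropLast hmur hokr (ans + que.getLast hq)
        · rw [if_neg hb1]
          by_cases hc : 5 ≤ que.getLast hq
          · rw [if_pos hc]
            have hBtrue : 5 < que.getLast hq ∨ (que.getLast hq = 5 ∧ 5 ≤ PySem.Int.mod (solVal que.dropLast) 10) := by
              by_cases hp5 : que.getLast hq = 5
              · refine Or.inr ⟨hp5, ?_⟩
                have hrne : que.dropLast ≠ [] := fun h0 => hb1 (Or.inr ⟨h0, hp5⟩)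
                have hge : ¬(PySem.List.pyGetD que.dropLast (-1) 0 < 5) :=
                  fun hlt => hb1 (Or.inl ⟨hrne, hp5, hlt⟩)
                rw [solVal_mod que.dropLast hokr hrne]
                rw [PySem.List.pyGetD_neg_one que.dropLast 0 hrne] at hge
                omega
              · exact Or.inl (by omega)
            rw [if_pos hBtrue]
            obtain ⟨k, hokq, hvq, hlq⟩ := solCarry que.dropLast hokr
            have hmuq : solMu (if solDropNines que.dropLast ≠ [] then solIncLast (solDropNines que.dropLast) else [1]) ≤ n := by
              have hlt : solMu (if solDropNines que.dropLast ≠ [] then solIncLast (solDropNines que.dropLast) else [1]) < solMu que := by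
                apply solMu_carry_lt _ _ ?h1 hq
                case h1 =>
                  intro h1
                  subst h1
                  norm_num [List.getLast_singleton] at hc
                rcases hlq with h1 | h1
                · exact Or.inl h1
                · refine Or.inr ?_
                  have : 0 < que.length := List.length_pos_iff.mpr hq
                  simp only [List.length_dropLast] at h1
                  omega
              omega
            rw [ih _ hmuq hokq (ans + (10 - que.getLast hq))]
            have hvq' : 0 ≤ solVal (if solDropNines que.dropLast ≠ [] then solIncLast (solDropNines que.dropLast) else [1]) := solVal_nonneg _ hokq
            calc solAltLoop (solVal (if solDropNines que.dropLast ≠ [] then solIncLast (solDropNines que.dropLast) else [1])) (ans + (10 - que.getLast hq))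
                = solAltLoop (solVal (if solDropNines que.dropLast ≠ [] then solIncLast (solDropNines que.dropLast) else [1]) * 10 ^ k) (ans + (10 - que.getLast hq)) := (solAltLoop_pad k _ _ hvq').symm
              _ = solAltLoop (solVal que.dropLast + 1) (ans + (10 - que.getLast hq)) := by rw [hvq]
          · rw [if_neg hc]
            rw [if_neg (by omega)]
            exact ih que.dropLast hmur hokr (ans + que.getLast hq)

theorem solParseDigit (m : Nat) (h : m < 10) :
    (PySem.Int.ofStr? (String.ofList [Nat.digitChar m])).getD 0 = (m : Int) := by
  interval_cases m <;> decide

-- the parsed digit string of a natural number: digits, value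
theorem solDigits_spec (n : Nat) :
    solOK ((Nat.toDigits 10 n).map (fun c => (PySem.Int.ofStr? (String.ofList [c])).getD 0)) ∧
    solVal ((Nat.toDigits 10 n).map (fun c => (PySem.Int.ofStr? (String.ofList [c])).getD 0)) = (n : Int) := by
  induction n using Nat.strong_induction_on with
  | _ n ih =>
    by_cases h10 : n < 10
    · rw [Nat.toDigits_of_lt_base h10, List.map_singleton, solParseDigit n h10]
      refine ⟨?_, by simp [solVal]⟩
      intro d hd
      simp at hd
      omega
    · push Not at h10
      rw [Nat.toDigits_eq_if (by norm_num : (1:Nat) < 10), if_neg (by omega), List.map_append,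
        List.map_singleton, solParseDigit (n % 10) (Nat.mod_lt _ (by norm_num))]
      obtain ⟨ih1, ih2⟩ := ih (n / 10) (by omega)
      constructor
      · intro d hd
        rcases List.mem_append.mp hd with hd | hd
        · exact ih1 d hd
        · simp at hd
          have := Nat.mod_lt n (y := 10) (by norm_num)
          omega
      · rw [solVal_append, ih2]
        have h1 := Nat.mod_lt n (y := 10) (by norm_num)
        have h2 : 10 * (n / 10) + n % 10 = n := Nat.div_add_mod n 10
        push_cast
        omega

-- ===== VERDICT (by name: the statement is the Claim_ definition above) =====
theorem solution_spec : Claim_equal_solution := by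
  intro storey _ hpre
  unfold Pre_solution at hpre
  unfold Spec_solution solution solution_alt
  have htl : (PySem.Int.toStr storey).toList = Nat.toDigits 10 storey.toNat := by
    rw [PySem.Int.toList_toStr]
    unfold PySem.Int.toChars
    rw [if_neg (by omega)]
  rw [htl]
  obtain ⟨hok, hval⟩ := solDigits_spec storey.toNat
  rw [solLoop_eq (solMu _) _ le_rfl hok, hval, Int.toNat_of_nonneg hpre]
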